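-- pv_equiv track=rewrite | github.com/eddmann/my-own-coding-agent | src/agent/core/settings.py | clamp_thinking_level
-- ===== SOURCE A (Python) =====
-- from enum import StrEnum
--
-- class ThinkingLevel(StrEnum):
--     """Thinking/reasoning effort level for supported models."""
--
--     OFF = "off"
--     MINIMAL = "minimal"
--     LOW = "low"
--     MEDIUM = "medium"
--     HIGH = "high"
--     XHIGH = "xhigh"  # Extended high - very large budget, select models only
--
-- def clamp_thinking_level(level: ThinkingLevel, available: list[ThinkingLevel]) -> ThinkingLevel:
--     """Clamp a thinking level to the available levels."""
--     if level in available: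
--         return level
--
--     all_levels = list(ThinkingLevel)
--     level_idx = all_levels.index(level)
--
--     for check_level in reversed(all_levels[: level_idx + 1]):
--         if check_level in available:
--             return check_level
--
--     return available[0] if available else ThinkingLevel.OFF
-- ===== SOURCE B (Python) =====
-- from enum import StrEnum
--
-- class ThinkingLevel(StrEnum):
--     """Thinking/reasoning effort level for supported models."""
--
--     OFF = "off"
--     MINIMAL = "minimal"
--     LOW = "low"
--     MEDIUM = "medium"
--     HIGH = "high"
--     XHIGH = "xhigh"
--
-- def clamp_thinking_level(level, available):
--     """Clamp a thinking level to the available levels.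
--
--     Single pass over `available`, tracking the best (highest-ranked) level
--     not above `level`, instead of walking the enum and probing membership.
--     """
--     if level in available:
--         return level
--
--     all_levels = list(ThinkingLevel)
--     level_idx = all_levels.index(level)
--
--     best = -1
--     for lv in available:
--         if lv in all_levels:
--             r = all_levels.index(lv)
--             if r <= level_idx and r > best:
--                 best = r
--
--     if best >= 0:
--         return all_levels[best]
--     return available[0] if available else ThinkingLevel.OFF
-- ===== Notes on version B (the rewrite author's own statement) =====
-- stated objective: alternative
-- what changed: B replaces A's reverse scan of the fixed enum with membership probes by a single pass over `available` that tracks the highest rank not above the requested level.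
import Mathlib
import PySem

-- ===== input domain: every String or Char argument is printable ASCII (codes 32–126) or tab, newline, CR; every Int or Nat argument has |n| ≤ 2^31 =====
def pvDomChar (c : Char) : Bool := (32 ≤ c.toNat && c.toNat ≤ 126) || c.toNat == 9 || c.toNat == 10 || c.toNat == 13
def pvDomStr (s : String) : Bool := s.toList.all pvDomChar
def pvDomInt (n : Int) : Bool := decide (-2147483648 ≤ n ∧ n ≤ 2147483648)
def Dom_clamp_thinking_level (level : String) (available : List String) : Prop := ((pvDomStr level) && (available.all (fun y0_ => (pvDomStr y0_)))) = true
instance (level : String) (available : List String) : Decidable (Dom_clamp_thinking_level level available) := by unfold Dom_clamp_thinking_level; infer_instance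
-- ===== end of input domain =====

-- B does a single pass over `available` tracking the best admissible rank, instead of A's
-- reverse scan of the fixed enum with membership probes (alternative structure, same results).

-- ===== PORT A =====
-- list(ThinkingLevel) as value strings
def pvAllLevels : List String := ["off", "minimal", "low", "medium", "high", "xhigh"]

def clamp_thinking_level (level : String) (available : List String) : String :=
  if available.contains level then level
  else
    match PySem.List.index? pvAllLevels level with
    | none => "off"  -- Python raises ValueError here; excluded by Pre_
    | some level_idx =>
      match (PySem.List.slice pvAllLevels (some 0) (some ((level_idx : Int) + 1))).reverse.find?
          (fun check_level => available.contains check_level) with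
      | some check_level => check_level
      | none =>
        match available with
        | [] => "off"
        | a :: _ => a

-- ===== PORT B =====
-- one loop iteration of B: fold the next available level into the best rank seen so far
def pvBestStep (level_idx : Nat) (best : Int) (lv : String) : Int :=
  match PySem.List.index? pvAllLevels lv with
  | none => best
  | some r => if (r : Int) ≤ (level_idx : Int) ∧ best < (r : Int) then (r : Int) else best

def clamp_thinking_level_alt (level : String) (available : List String) : String :=
  if available.contains level then level
  else
    match PySem.List.index? pvAllLevels level with
    | none => "off"  -- Python raises ValueError here; excluded by Pre_
    | some level_idx =>
      let best := available.foldl (pvBestStep level_idx) (-1)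
      if 0 ≤ best then (PySem.List.pyGet? pvAllLevels best).getD "off"
      else
        match available with
        | [] => "off"
        | a :: _ => a

-- ===== PRECONDITION & SPEC =====
-- Pre_ excludes exactly the inputs where both programs raise ValueError:
-- level neither in `available` nor a ThinkingLevel member.
def Pre_clamp_thinking_level (level : String) (available : List String) : Prop :=
  available.contains level = true ∨ pvAllLevels.contains level = true
instance (level : String) (available : List String) : Decidable (Pre_clamp_thinking_level level available) := by unfold Pre_clamp_thinking_level; infer_instance

def pvWitness_clamp_thinking_level : String × List String := ("high", ["low", "off"])

def Spec_clamp_thinking_level (level : String) (available : List String) (out : String) : Prop := out = clamp_thinking_level_alt level available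
instance (level : String) (available : List String) (out : String) : Decidable (Spec_clamp_thinking_level level available out) := by unfold Spec_clamp_thinking_level; infer_instance

-- ===== CLAIM (what is proved, stated in full; the proofs are below) =====
def Claim_equal_clamp_thinking_level : Prop := ∀ (level : String) (available : List String), Dom_clamp_thinking_level level available → Pre_clamp_thinking_level level available → Spec_clamp_thinking_level level available (clamp_thinking_level level available)

-- ===== LEMMAS AND PROOFS =====

-- the best admissible rank present in `av`, as a nested-if formula over membership
def pvBestF (idx : Nat) (av : List String) : Int :=
  if 5 ≤ idx ∧ av.contains "xhigh" = true then 5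
  else if 4 ≤ idx ∧ av.contains "high" = true then 4
  else if 3 ≤ idx ∧ av.contains "medium" = true then 3
  else if 2 ≤ idx ∧ av.contains "low" = true then 2
  else if 1 ≤ idx ∧ av.contains "minimal" = true then 1
  else if av.contains "off" = true then 0
  else -1

lemma pvBestF_ge (idx : Nat) (av : List String) : -1 ≤ pvBestF idx av := by
  unfold pvBestF; split_ifs <;> omega

set_option maxHeartbeats 1000000 in
lemma foldl_bestStep (idx : Nat) (av : List String) (acc : Int) (hacc : -1 ≤ acc) :
    av.foldl (pvBestStep idx) acc = max acc (pvBestF idx av) := by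
  induction av generalizing acc with
  | nil =>
    simp only [List.foldl_nil, pvBestF, List.contains_nil, Bool.false_eq_true, and_false, if_false]
    omega
  | cons lv av ih =>
    rw [List.foldl_cons]
    rcases h : PySem.List.index? pvAllLevels lv with _ | r
    · have hmem : lv ∉ pvAllLevels := (PySem.List.index?_eq_none_iff _ _).mp h
      simp only [pvAllLevels, List.mem_cons, List.not_mem_nil, or_false, not_or] at hmem
      obtain ⟨h1, h2, h3, h4, h5, h6⟩ := hmem
      simp only [pvBestStep, h]
      rw [ih acc hacc]
      have hF : pvBestF idx (lv :: av) = pvBestF idx av := by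
        unfold pvBestF
        simp only [List.contains_cons]
        have e1 : ("xhigh" == lv) = false := by simpa using fun hx => h6 hx.symm
        have e2 : ("high" == lv) = false := by simpa using fun hx => h5 hx.symm
        have e3 : ("medium" == lv) = false := by simpa using fun hx => h4 hx.symm
        have e4 : ("low" == lv) = false := by simpa using fun hx => h3 hx.symm
        have e5 : ("minimal" == lv) = false := by simpa using fun hx => h2 hx.symm
        have e6 : ("off" == lv) = false := by simpa using fun hx => h1 hx.symm
        simp [e1, e2, e3, e4, e5, e6]
      rw [hF]
    · have hmem : lv ∈ pvAllLevels := by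
        have := (PySem.List.index?_isSome_iff pvAllLevels lv)
        simp only [h, Option.isSome_some, true_iff] at this
        exact this
      simp only [pvAllLevels, List.mem_cons, List.not_mem_nil, or_false] at hmem
      rcases hmem with rfl | rfl | rfl | rfl | rfl | rfl
      · -- "off", rank 0
        simp only [pvBestStep, show PySem.List.index? pvAllLevels "off" = some 0 from by decide]
        rw [ih _ (by split_ifs <;> omega)]
        unfold pvBestF
        simp
        split_ifs <;> omega
      · -- "minimal", rank 1
        simp only [pvBestStep, show PySem.List.index? pvAllLevels "minimal" = some 1 from by decide]
        rw [ih _ (by split_ifs <;> omega)]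
        unfold pvBestF
        simp
        split_ifs <;> omega
      · -- "low", rank 2
        simp only [pvBestStep, show PySem.List.index? pvAllLevels "low" = some 2 from by decide]
        rw [ih _ (by split_ifs <;> omega)]
        unfold pvBestF
        simp
        split_ifs <;> omega
      · -- "medium", rank 3
        simp only [pvBestStep, show PySem.List.index? pvAllLevels "medium" = some 3 from by decide]
        rw [ih _ (by split_ifs <;> omega)]
        unfold pvBestF
        simp
        split_ifs <;> omega
      · -- "high", rank 4
        simp only [pvBestStep, show PySem.List.index? pvAllLevels "high" = some 4 from by decide]
        rw [ih _ (by split_ifs <;> omega)]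
        unfold pvBestF
        simp
        split_ifs <;> omega
      · -- "xhigh", rank 5
        simp only [pvBestStep, show PySem.List.index? pvAllLevels "xhigh" = some 5 from by decide]
        rw [ih _ (by split_ifs <;> omega)]
        unfold pvBestF
        simp
        split_ifs <;> omega

lemma pvFindCons (av : List String) (x : String) (xs : List String) :
    (x :: xs).find? (fun c => av.contains c) =
      if x ∈ av then some x else xs.find? (fun c => av.contains c) := by
  by_cases hx : x ∈ av <;> simp [List.find?_cons, hx]

-- ===== VERDICT (by name: the statement is the Claim_ definition above) =====
theorem clamp_thinking_level_spec : Claim_equal_clamp_thinking_level := by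
  intro level av _ hpre
  unfold Spec_clamp_thinking_level
  by_cases hc : av.contains level = true
  · have hc2 : level ∈ av := by simpa using hc
    simp [clamp_thinking_level, clamp_thinking_level_alt, hc2]
  · have hm : level ∈ pvAllLevels := by
      rcases hpre with h | h
      · exact absurd h hc
      · simpa using h
    simp only [pvAllLevels, List.mem_cons, List.not_mem_nil, or_false] at hm
    rcases hm with rfl | rfl | rfl | rfl | rfl | rfl
    · -- level = "off"
      have hc' : "off" ∉ av := by simpa using hc
      simp only [clamp_thinking_level, clamp_thinking_level_alt, if_neg hc,
        show PySem.List.index? pvAllLevels "off" = some 0 from by decide]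
      rw [foldl_bestStep 0 av (-1) (by omega),
        max_eq_right (le_trans (by omega) (pvBestF_ge 0 av)),
        show (PySem.List.slice pvAllLevels (some 0) (some (((0:Nat) : Int) + 1))).reverse
          = ["off"] from by decide]
      unfold pvBestF
      simp only [pvFindCons, List.find?_nil]
      simp [hc']
    · -- level = "minimal"
      have hc' : "minimal" ∉ av := by simpa using hc
      simp only [clamp_thinking_level, clamp_thinking_level_alt, if_neg hc,
        show PySem.List.index? pvAllLevels "minimal" = some 1 from by decide]
      rw [foldl_bestStep 1 av (-1) (by omega),
        max_eq_right (le_trans (by omega) (pvBestF_ge 1 av)),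
        show (PySem.List.slice pvAllLevels (some 0) (some (((1:Nat) : Int) + 1))).reverse
          = ["minimal", "off"] from by decide]
      unfold pvBestF
      simp only [pvFindCons, List.find?_nil]
      simp [hc']
      all_goals split_ifs <;>
        first
        | omega
        | simp [pvAllLevels, PySem.List.pyGet?, PySem.List.pyIdx?]
    · -- level = "low"
      have hc' : "low" ∉ av := by simpa using hc
      simp only [clamp_thinking_level, clamp_thinking_level_alt, if_neg hc,
        show PySem.List.index? pvAllLevels "low" = some 2 from by decide]
      rw [foldl_bestStep 2 av (-1) (by omega),
        max_eq_right (le_trans (by omega) (pvBestF_ge 2 av)),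
        show (PySem.List.slice pvAllLevels (some 0) (some (((2:Nat) : Int) + 1))).reverse
          = ["low", "minimal", "off"] from by decide]
      unfold pvBestF
      simp only [pvFindCons, List.find?_nil]
      simp [hc']
      all_goals split_ifs <;>
        first
        | omega
        | simp [pvAllLevels, PySem.List.pyGet?, PySem.List.pyIdx?]
    · -- level = "medium"
      have hc' : "medium" ∉ av := by simpa using hc
      simp only [clamp_thinking_level, clamp_thinking_level_alt, if_neg hc,
        show PySem.List.index? pvAllLevels "medium" = some 3 from by decide]
      rw [foldl_bestStep 3 av (-1) (by omega),
        max_eq_right (le_trans (by omega) (pvBestF_ge 3 av)),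
        show (PySem.List.slice pvAllLevels (some 0) (some (((3:Nat) : Int) + 1))).reverse
          = ["medium", "low", "minimal", "off"] from by decide]
      unfold pvBestF
      simp only [pvFindCons, List.find?_nil]
      simp [hc']
      all_goals split_ifs <;>
        first
        | omega
        | simp [pvAllLevels, PySem.List.pyGet?, PySem.List.pyIdx?]
    · -- level = "high"
      have hc' : "high" ∉ av := by simpa using hc
      simp only [clamp_thinking_level, clamp_thinking_level_alt, if_neg hc,
        show PySem.List.index? pvAllLevels "high" = some 4 from by decide]
      rw [foldl_bestStep 4 av (-1) (by omega),
        max_eq_right (le_trans (by omega) (pvBestF_ge 4 av)),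
        show (PySem.List.slice pvAllLevels (some 0) (some (((4:Nat) : Int) + 1))).reverse
          = ["high", "medium", "low", "minimal", "off"] from by decide]
      unfold pvBestF
      simp only [pvFindCons, List.find?_nil]
      simp [hc']
      all_goals split_ifs <;>
        first
        | omega
        | simp [pvAllLevels, PySem.List.pyGet?, PySem.List.pyIdx?]
    · -- level = "xhigh"
      have hc' : "xhigh" ∉ av := by simpa using hc
      simp only [clamp_thinking_level, clamp_thinking_level_alt, if_neg hc,
        show PySem.List.index? pvAllLevels "xhigh" = some 5 from by decide]
      rw [foldl_bestStep 5 av (-1) (by omega),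
        max_eq_right (le_trans (by omega) (pvBestF_ge 5 av)),
        show (PySem.List.slice pvAllLevels (some 0) (some (((5:Nat) : Int) + 1))).reverse
          = ["xhigh", "high", "medium", "low", "minimal", "off"] from by decide]
      unfold pvBestF
      simp only [pvFindCons, List.find?_nil]
      simp [hc']
      all_goals split_ifs <;>
        first
        | omega
        | simp [pvAllLevels, PySem.List.pyGet?, PySem.List.pyIdx?]
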